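-- pv_equiv track=rewrite | github.com/ekut-es/hannah | hannah/nas/search_space/utils.py | vec_to_knob
-- ===== SOURCE A (Python) =====
-- def vec_to_knob(vec, knobs):
--     cfg = {}
--     ct = 0
--     for k, v in knobs.items():
--         cfg[k] = {}
--         for x, y in v.items():
--             if isinstance(y, dict):
--                 cfg[k][x] = {}
--                 for ki, vi in y.items():
--                     cfg[k][x][ki] = vi[vec[ct]]
--                     ct += 1
--             else:
--                 cfg[k][x] = y[vec[ct]]
--                 ct += 1
--     return cfg
-- ===== SOURCE B (Python) =====
-- def vec_to_knob(vec, knobs):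
--     it = iter(vec)
--
--     def rec(node):
--         if isinstance(node, dict):
--             return {k: rec(v) for k, v in node.items()}
--         return node[next(it)]
--
--     return {k: rec(v) for k, v in knobs.items()}
-- ===== Notes on version B (the rewrite author's own statement) =====
-- stated objective: simpler
-- what changed: Replaces the three hard-coded nested loops and the manual counter with a short recursive helper over the structure that consumes indices from a shared iterator (ported as a threaded remaining-vector state).
import Mathlib
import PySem

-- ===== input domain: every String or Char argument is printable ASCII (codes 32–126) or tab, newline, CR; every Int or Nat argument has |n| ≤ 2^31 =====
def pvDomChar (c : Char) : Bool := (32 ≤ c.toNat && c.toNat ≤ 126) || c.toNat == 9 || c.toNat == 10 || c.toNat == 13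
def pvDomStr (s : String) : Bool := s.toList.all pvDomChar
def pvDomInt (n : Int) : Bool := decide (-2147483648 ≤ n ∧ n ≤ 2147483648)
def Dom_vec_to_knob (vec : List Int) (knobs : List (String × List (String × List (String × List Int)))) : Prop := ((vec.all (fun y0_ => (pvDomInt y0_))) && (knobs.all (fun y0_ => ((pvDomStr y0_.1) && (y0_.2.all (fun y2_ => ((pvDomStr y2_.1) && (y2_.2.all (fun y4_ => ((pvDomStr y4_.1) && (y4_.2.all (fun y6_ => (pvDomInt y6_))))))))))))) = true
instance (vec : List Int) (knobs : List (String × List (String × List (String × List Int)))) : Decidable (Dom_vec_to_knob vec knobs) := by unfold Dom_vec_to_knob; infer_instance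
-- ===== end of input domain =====

-- B replaces A's three hard-coded nested loops with manual counter by a recursive helper
-- consuming indices from a shared iterator (simpler decomposition, same cost).

-- ===== PORT A =====
-- vi[vec[ct]], total with default 0 (only reached outside Pre_, where Python A raises)
def aLeaf (vec : List Int) (ct : Int) (vi : List Int) : Int :=
  (PySem.List.pyGet? vi ((PySem.List.pyGet? vec ct).getD 0)).getD 0

def aFold3 (vec : List Int) (st : List (String × Int) × Int)
    (y : List (String × List Int)) : List (String × Int) × Int :=
  y.foldl (fun st3 kivi => (st3.1 ++ [(kivi.1, aLeaf vec st3.2 kivi.2)], st3.2 + 1)) st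

def aFold2 (vec : List Int) (st : List (String × List (String × Int)) × Int)
    (v : List (String × List (String × List Int))) : List (String × List (String × Int)) × Int :=
  v.foldl (fun st2 xy =>
    let r := aFold3 vec ([], st2.2) xy.2
    (st2.1 ++ [(xy.1, r.1)], r.2)) st

def vec_to_knob (vec : List Int) (knobs : List (String × List (String × List (String × List Int)))) : List (String × List (String × List (String × Int))) :=
  (knobs.foldl (fun st kv =>
    let r := aFold2 vec ([], st.2) kv.2
    (st.1 ++ [(kv.1, r.1)], r.2)) ([], (0 : Int))).1

-- ===== PORT B =====
-- the iterator over vec is threaded as the list of remaining elements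
def bGo3 (rest : List Int) (y : List (String × List Int)) : List (String × Int) × List Int :=
  match y with
  | [] => ([], rest)
  | (ki, vi) :: t =>
    let v := (PySem.List.pyGet? vi (rest.headD 0)).getD 0
    let r := bGo3 rest.tail t
    ((ki, v) :: r.1, r.2)

def bGo2 (rest : List Int) (v : List (String × List (String × List Int))) :
    List (String × List (String × Int)) × List Int :=
  match v with
  | [] => ([], rest)
  | (x, y) :: t =>
    let r1 := bGo3 rest y
    let r2 := bGo2 r1.2 t
    ((x, r1.1) :: r2.1, r2.2)

def bGo1 (rest : List Int) (knobs : List (String × List (String × List (String × List Int)))) :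
    List (String × List (String × List (String × Int))) × List Int :=
  match knobs with
  | [] => ([], rest)
  | (k, v) :: t =>
    let r1 := bGo2 rest v
    let r2 := bGo1 r1.2 t
    ((k, r1.1) :: r2.1, r2.2)

def vec_to_knob_alt (vec : List Int) (knobs : List (String × List (String × List (String × List Int)))) : List (String × List (String × List (String × Int))) :=
  (bGo1 vec knobs).1

-- ===== PRECONDITION & SPEC =====
-- the leaf lists of knobs in traversal order
def pvLeaves (knobs : List (String × List (String × List (String × List Int)))) : List (List Int) :=
  knobs.flatMap (fun p => p.2.flatMap (fun q => q.2.map Prod.snd))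

-- Pre_: A raises IndexError when the counter runs past vec or vec's entry is out of range of a leaf list
def Pre_vec_to_knob (vec : List Int) (knobs : List (String × List (String × List (String × List Int)))) : Prop :=
  (pvLeaves knobs).length ≤ vec.length ∧
    ∀ p ∈ (pvLeaves knobs).zip vec, (PySem.List.pyGet? p.1 p.2).isSome = true
instance (vec : List Int) (knobs : List (String × List (String × List (String × List Int)))) : Decidable (Pre_vec_to_knob vec knobs) := by unfold Pre_vec_to_knob; infer_instance

def pvWitness_vec_to_knob : List Int × (List (String × List (String × List (String × List Int)))) :=
  ([1, 0, -1], [("a", [("b", [("c", [10, 20]), ("d", [30])]), ("e", [("f", [40, 50])])])])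

def Spec_vec_to_knob (vec : List Int) (knobs : List (String × List (String × List (String × List Int)))) (out : List (String × List (String × List (String × Int)))) : Prop := out = vec_to_knob_alt vec knobs
instance (vec : List Int) (knobs : List (String × List (String × List (String × List Int)))) (out : List (String × List (String × List (String × Int)))) : Decidable (Spec_vec_to_knob vec knobs out) := by unfold Spec_vec_to_knob; infer_instance

-- ===== CLAIM (what is proved, stated in full; the proofs are below) =====
def Claim_equal_vec_to_knob : Prop := ∀ (vec : List Int) (knobs : List (String × List (String × List (String × List Int)))), Dom_vec_to_knob vec knobs → Pre_vec_to_knob vec knobs → Spec_vec_to_knob vec knobs (vec_to_knob vec knobs)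

-- ===== LEMMAS AND PROOFS =====
theorem pvWitness_ok : Dom_vec_to_knob pvWitness_vec_to_knob.1 pvWitness_vec_to_knob.2 ∧
    Pre_vec_to_knob pvWitness_vec_to_knob.1 pvWitness_vec_to_knob.2 := by decide

theorem aLeaf_eq (vec vi : List Int) (n : ℕ) :
    aLeaf vec (n : Int) vi = (PySem.List.pyGet? vi ((vec.drop n).headD 0)).getD 0 := by
  simp [aLeaf, List.head?_drop, List.headD_eq_head?_getD]

theorem bGo3_snd (rest : List Int) (y : List (String × List Int)) :
    (bGo3 rest y).2 = rest.drop y.length := by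
  induction y generalizing rest with
  | nil => simp [bGo3]
  | cons h t ih =>
    obtain ⟨ki, vi⟩ := h
    simp [bGo3, ih]

theorem aFold3_eq (vec : List Int) (y : List (String × List Int))
    (acc : List (String × Int)) (n : ℕ) :
    aFold3 vec (acc, (n : Int)) y = (acc ++ (bGo3 (vec.drop n) y).1, ((n + y.length : ℕ) : Int)) := by
  induction y generalizing acc n with
  | nil => simp [aFold3, bGo3]
  | cons h t ih =>
    obtain ⟨ki, vi⟩ := h
    have hc : ((n : Int) + 1) = ((n + 1 : ℕ) : Int) := by push_cast; ring
    simp only [aFold3, List.foldl_cons]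
    rw [hc]
    have ih' := ih (acc ++ [(ki, aLeaf vec (n : Int) vi)]) (n + 1)
    simp only [aFold3] at ih'
    rw [ih']
    refine Prod.ext ?_ ?_
    · simp [bGo3, aLeaf_eq, List.tail_drop, List.append_assoc]
    · simp only [List.length_cons]
      omega

theorem bGo2_snd (rest : List Int) (v : List (String × List (String × List Int))) :
    (bGo2 rest v).2 = rest.drop (v.flatMap (fun q => q.2.map Prod.snd)).length := by
  induction v generalizing rest with
  | nil => simp [bGo2]
  | cons h t ih =>
    obtain ⟨x, y⟩ := h
    simp [bGo2, ih, bGo3_snd, List.drop_drop]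

theorem aFold2_eq (vec : List Int) (v : List (String × List (String × List Int)))
    (acc : List (String × List (String × Int))) (n : ℕ) :
    aFold2 vec (acc, (n : Int)) v =
      (acc ++ (bGo2 (vec.drop n) v).1,
       ((n + (v.flatMap (fun q => q.2.map Prod.snd)).length : ℕ) : Int)) := by
  induction v generalizing acc n with
  | nil => simp [aFold2, bGo2]
  | cons h t ih =>
    obtain ⟨x, y⟩ := h
    simp only [aFold2, List.foldl_cons]
    rw [aFold3_eq vec y [] n]
    have ih' := ih (acc ++ [(x, (bGo3 (vec.drop n) y).1)]) (n + y.length)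
    simp only [aFold2] at ih'
    simp only [List.nil_append]
    rw [ih']
    refine Prod.ext ?_ ?_
    · simp [bGo2, bGo3_snd, List.drop_drop, List.append_assoc]
    · simp only [List.flatMap_cons, List.length_append, List.length_map]
      omega

theorem fold1_eq (vec : List Int)
    (knobs : List (String × List (String × List (String × List Int))))
    (acc : List (String × List (String × List (String × Int)))) (n : ℕ) :
    knobs.foldl (fun st kv =>
        let r := aFold2 vec ([], st.2) kv.2
        (st.1 ++ [(kv.1, r.1)], r.2)) (acc, (n : Int)) =
      (acc ++ (bGo1 (vec.drop n) knobs).1, ((n + (pvLeaves knobs).length : ℕ) : Int)) := by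
  induction knobs generalizing acc n with
  | nil => simp [bGo1, pvLeaves]
  | cons h t ih =>
    obtain ⟨k, v⟩ := h
    simp only [List.foldl_cons]
    rw [aFold2_eq vec v [] n]
    have ih' := ih (acc ++ [(k, (bGo2 (vec.drop n) v).1)])
      (n + (v.flatMap (fun q => q.2.map Prod.snd)).length)
    simp only [List.nil_append]
    rw [ih']
    refine Prod.ext ?_ ?_
    · simp [bGo1, bGo2_snd, List.drop_drop, List.append_assoc]
    · simp only [pvLeaves, List.flatMap_cons, List.length_append]
      omega

theorem ports_eq (vec : List Int)
    (knobs : List (String × List (String × List (String × List Int)))) :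
    vec_to_knob vec knobs = vec_to_knob_alt vec knobs := by
  unfold vec_to_knob vec_to_knob_alt
  rw [show ((0 : Int)) = ((0 : ℕ) : Int) from rfl, fold1_eq vec knobs [] 0]
  simp

-- ===== VERDICT (by name: the statement is the Claim_ definition above) =====
theorem vec_to_knob_spec : Claim_equal_vec_to_knob := by
  intro vec knobs _ _
  exact ports_eq vec knobs
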